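-- pv_equiv track=rewrite | github.com/Divyanshu6928/Competitive_Programming | Difficulty 800/upscaling.py | checkerboard
-- ===== SOURCE A (Python) =====
-- def checkerboard(n):
--     board = ""
--     for i in range(1 * n):
--         if i % 4 < 2:
--             board += "#"
--         else:
--             board += "."
--         if i % n == n - 1:
--             board += "\n"
--     return board
-- ===== SOURCE B (Python) =====
-- def checkerboard(n):
--     if n <= 0:
--         return ""
--     return ("##.." * (n // 4 + 1))[:n] + "\n"
-- ===== Notes on version B (the rewrite author's own statement) =====
-- stated objective: faster
-- what changed: Replaces the per-character loop with two conditionals by one repetition of the period-4 pattern '##..' sliced to length n plus a trailing newline, returning the empty string for non-positive n.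
import Mathlib
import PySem

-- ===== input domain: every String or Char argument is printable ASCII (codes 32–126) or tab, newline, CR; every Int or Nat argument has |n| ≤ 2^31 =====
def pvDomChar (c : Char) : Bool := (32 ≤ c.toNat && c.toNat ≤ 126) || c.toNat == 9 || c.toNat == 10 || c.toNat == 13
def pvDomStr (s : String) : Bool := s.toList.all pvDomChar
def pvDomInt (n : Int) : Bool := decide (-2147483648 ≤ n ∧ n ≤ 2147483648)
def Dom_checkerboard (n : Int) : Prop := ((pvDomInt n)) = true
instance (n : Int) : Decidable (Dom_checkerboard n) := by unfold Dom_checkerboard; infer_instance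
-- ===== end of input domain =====

-- B builds the row by repeating the period-4 pattern "##.." and slicing to length instead of a
-- per-character loop; asymptotically faster (no repeated string concatenation).


-- ===== PORT A =====
def checkerboard (n : Int) : String :=
  String.ofList <|
    (PySem.List.pyRange 0 (1 * n) 1).foldl (fun board i =>
      let board := board ++ (if PySem.Int.mod i 4 < 2 then ['#'] else ['.'])
      if PySem.Int.mod i n = n - 1 then board ++ ['\n'] else board) []

-- ===== PORT B =====
def checkerboard_alt (n : Int) : String :=
  if n ≤ 0 then "" else
    String.ofList
      (PySem.List.slice (PySem.List.pyRepeat ['#', '#', '.', '.'] (PySem.Int.floordiv n 4 + 1))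
        none (some n) ++ ['\n'])

-- ===== PRECONDITION & SPEC =====
def Spec_checkerboard (n : Int) (out : String) : Prop := out = checkerboard_alt n
instance (n : Int) (out : String) : Decidable (Spec_checkerboard n out) := by unfold Spec_checkerboard; infer_instance

-- ===== CLAIM (what is proved, stated in full; the proofs are below) =====
def Claim_equal_checkerboard : Prop := ∀ (n : Int), Dom_checkerboard n → Spec_checkerboard n (checkerboard n)

-- ===== LEMMAS AND PROOFS =====

-- the period-4 cell
def pvPat (i : Int) : Char := if PySem.Int.mod i 4 < 2 then '#' else '.'

-- character j of the repeated pattern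
lemma pvRep_getD (K : Nat) : ∀ j : Nat, j < 4 * K →
    ((List.replicate K (['#', '#', '.', '.'] : List Char)).flatten).getD j 'x'
      = if j % 4 < 2 then '#' else '.' := by
  induction K with
  | zero => intro j hj; omega
  | succ K ih =>
    intro j hj
    rw [List.replicate_succ, List.flatten_cons]
    by_cases h4 : j < 4
    · interval_cases j <;> simp [List.getD]
    · obtain ⟨m, rfl⟩ : ∃ m, j = m + 4 := ⟨j - 4, by omega⟩
      simp only [List.cons_append, List.nil_append, List.getD_cons_succ]
      rw [ih m (by omega)]
      have : (m + 4) % 4 = m % 4 := by omega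
      rw [this]

lemma pvRep_length (K : Nat) :
    ((List.replicate K (['#', '#', '.', '.'] : List Char)).flatten).length = 4 * K := by
  simp [List.length_flatten, List.map_replicate, List.sum_replicate]
  ring

-- B's sliced repetition equals the mapped pattern over the range
lemma pvBody_eq (n : Int) (hn : 1 ≤ n) :
    PySem.List.slice (PySem.List.pyRepeat ['#', '#', '.', '.'] (PySem.Int.floordiv n 4 + 1))
        none (some n)
      = (PySem.List.pyRange 0 n 1).map pvPat := by
  have h0 : (0 : Int) ≤ n := by omega
  rw [PySem.List.slice_to _ h0]
  unfold PySem.List.pyRepeat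
  set K : Nat := (PySem.Int.floordiv n 4 + 1).toNat with hK
  have hdiv : PySem.Int.floordiv n 4 = n / 4 := PySem.Int.floordiv_eq_ediv_of_pos (by omega)
  have hmK : n.toNat ≤ 4 * K := by
    have : n < 4 * (n / 4 + 1) := by omega
    omega
  rw [PySem.List.pyRange_one]
  apply List.ext_getElem
  · simp [List.length_take]
    omega
  · intro j h1 h2
    simp only [List.length_take, pvRep_length] at h1
    have hj : j < n.toNat := by omega
    have hfl : j < ((List.replicate K (['#', '#', '.', '.'] : List Char)).flatten).length := by
      rw [pvRep_length]; omega
    rw [List.getElem_take]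
    simp only [List.getElem_map, List.getElem_range]
    have hget : ((List.replicate K (['#', '#', '.', '.'] : List Char)).flatten)[j]'hfl
        = ((List.replicate K (['#', '#', '.', '.'] : List Char)).flatten).getD j 'x' := by
      rw [List.getD_eq_getElem _ _ hfl]
    rw [hget, pvRep_getD K j (by omega)]
    unfold pvPat
    have : PySem.Int.mod (0 + (j : Int)) 4 = ((j % 4 : Nat) : Int) := by
      rw [zero_add]; exact_mod_cast PySem.Int.mod_natCast j 4
    rw [this]
    by_cases h : j % 4 < 2
    · simp [h]; omega
    · simp [h]; omega

-- A's loop over the full range: newline fires exactly at the last index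
lemma pvLoopA (n : Int) (hn : 1 ≤ n) :
    (PySem.List.pyRange 0 n 1).foldl (fun board i =>
        let board := board ++ (if PySem.Int.mod i 4 < 2 then ['#'] else ['.'])
        if PySem.Int.mod i n = n - 1 then board ++ ['\n'] else board) []
      = (PySem.List.pyRange 0 n 1).map pvPat ++ ['\n'] := by
  have hsplit : PySem.List.pyRange 0 n 1 = PySem.List.pyRange 0 (n - 1) 1 ++ [n - 1] := by
    have := PySem.List.pyRange_one_succ_right (a := 0) (b := n - 1) (by omega)
    simpa using this
  have hmod : ∀ i : Int, 0 ≤ i → i < n → PySem.Int.mod i n = i := by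
    intro i h1 h2
    rw [PySem.Int.mod_eq_emod_of_pos (by omega)]
    exact Int.emod_eq_of_lt h1 h2
  rw [hsplit, List.foldl_append, List.map_append]
  have hpre : (PySem.List.pyRange 0 (n - 1) 1).foldl (fun board i =>
        let board := board ++ (if PySem.Int.mod i 4 < 2 then ['#'] else ['.'])
        if PySem.Int.mod i n = n - 1 then board ++ ['\n'] else board) []
      = (PySem.List.pyRange 0 (n - 1) 1).map pvPat := by
    rw [PySem.List.foldl_congr_mem _ _ (fun board i => board ++ [pvPat i]) _ ?_]
    · exact PySem.List.foldl_append_singleton_eq_map pvPat _ []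
    · intro acc i hi
      rw [PySem.List.mem_pyRange_one] at hi
      have : PySem.Int.mod i n = i := hmod i hi.1 (by omega)
      simp only [this, pvPat]
      have hne : ¬ i = n - 1 := by omega
      simp only [hne, if_false]
      split_ifs <;> rfl
  rw [hpre]
  simp only [List.foldl_cons, List.foldl_nil]
  have h1 : PySem.Int.mod (n - 1) n = n - 1 := hmod (n - 1) (by omega) (by omega)
  rw [if_pos h1]
  simp only [pvPat, List.map_singleton, List.append_assoc]
  split_ifs <;> simp

-- ===== VERDICT (by name: the statement is the Claim_ definition above) =====
theorem checkerboard_spec : Claim_equal_checkerboard := by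
  intro n _
  unfold Spec_checkerboard checkerboard checkerboard_alt
  rw [one_mul]
  by_cases hn : n ≤ 0
  · rw [if_pos hn, PySem.List.pyRange_one_eq_nil (by omega)]
    rfl
  · rw [if_neg hn, pvLoopA n (by omega), pvBody_eq n (by omega)]
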